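-- pv_equiv track=rewrite | github.com/sampoll/ridxutils | scripts/order.py | subscripts_for_offset_cmajor
-- ===== SOURCE A (Python) =====
-- def subscripts_for_offset_cmajor(D, off):
--    m = len(D)
--    X = [-1]*m
--    for j in range(m):
--      if j == 0:
--        s = off % D[0]
--      elif j == m-1:
--        s = off
--        for i in range(0,m-1):
--          s = s // D[i]
--      else:
--        s = off
--        for i in range(0,j,1):
--          s = s // D[i]
--        s = s % D[j]
--      X[j] = s
--    return X
-- ===== SOURCE B (Python) =====
-- def subscripts_for_offset_cmajor(D, off):
--     if not D:
--         return []
--     X = [off % D[0]]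
--     q = off // D[0]
--     for j in range(1, len(D) - 1):
--         X.append(q % D[j])
--         q //= D[j]
--     if len(D) > 1:
--         X.append(q)
--     return X
-- ===== Notes on version B (the rewrite author's own statement) =====
-- stated objective: faster
-- what changed: B replaces A's per-index restart (for each j, re-divide off by all of D[0..j-1]) with one pass keeping a running quotient that is divided by each dimension once.
import Mathlib
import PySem

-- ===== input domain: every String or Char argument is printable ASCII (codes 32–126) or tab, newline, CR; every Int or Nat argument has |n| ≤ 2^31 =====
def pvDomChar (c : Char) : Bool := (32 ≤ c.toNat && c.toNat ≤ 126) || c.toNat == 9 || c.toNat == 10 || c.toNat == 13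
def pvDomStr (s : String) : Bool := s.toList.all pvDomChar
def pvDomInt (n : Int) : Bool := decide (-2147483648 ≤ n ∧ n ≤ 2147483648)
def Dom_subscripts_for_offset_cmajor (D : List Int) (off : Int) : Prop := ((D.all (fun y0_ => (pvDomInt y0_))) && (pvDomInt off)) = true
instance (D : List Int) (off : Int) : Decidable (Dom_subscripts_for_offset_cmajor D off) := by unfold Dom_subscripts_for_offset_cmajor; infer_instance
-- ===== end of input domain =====

-- B keeps a single running quotient instead of re-dividing off from scratch for every index (one pass, asymptotically faster).

-- ===== PORT A =====
def subscripts_for_offset_cmajor (D : List Int) (off : Int) : List Int :=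
  let m : Int := (D.length : Int)
  let X : List Int := List.replicate D.length (-1)
  (PySem.List.pyRange 0 m 1).foldl (fun X j =>
      let s : Int :=
        if j = 0 then PySem.Int.mod off (PySem.List.pyGetD D 0 0)
        else if j = m - 1 then
          (PySem.List.pyRange 0 (m - 1) 1).foldl
            (fun s i => PySem.Int.floordiv s (PySem.List.pyGetD D i 0)) off
        else
          let s := (PySem.List.pyRange 0 j 1).foldl
            (fun s i => PySem.Int.floordiv s (PySem.List.pyGetD D i 0)) off
          PySem.Int.mod s (PySem.List.pyGetD D j 0)
      PySem.List.pySetD X j s) X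

-- ===== PORT B =====
def subscripts_for_offset_cmajor_alt (D : List Int) (off : Int) : List Int :=
  if D.isEmpty then []
  else
    let X : List Int := [PySem.Int.mod off (PySem.List.pyGetD D 0 0)]
    let q : Int := PySem.Int.floordiv off (PySem.List.pyGetD D 0 0)
    let Xq := (PySem.List.pyRange 1 ((D.length : Int) - 1) 1).foldl
        (fun (Xq : List Int × Int) j =>
          (Xq.1 ++ [PySem.Int.mod Xq.2 (PySem.List.pyGetD D j 0)],
           PySem.Int.floordiv Xq.2 (PySem.List.pyGetD D j 0))) (X, q)
    if (D.length : Int) > 1 then Xq.1 ++ [Xq.2] else Xq.1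

-- ===== PRECONDITION & SPEC =====
-- Pre_ excludes exactly the inputs where Python A raises ZeroDivisionError: a zero
-- among the dimensions used as divisors (all but the last, plus the only one when m = 1).
def Pre_subscripts_for_offset_cmajor (D : List Int) (off : Int) : Prop :=
  (D.dropLast.all (fun d => !(d == 0)) && (!(D.length == 1) || !(D.getD 0 1 == 0))) = true
instance (D : List Int) (off : Int) : Decidable (Pre_subscripts_for_offset_cmajor D off) := by
  unfold Pre_subscripts_for_offset_cmajor; infer_instance
def pvWitness_subscripts_for_offset_cmajor : List Int × Int := ([3, 4, 5], 37)

def Spec_subscripts_for_offset_cmajor (D : List Int) (off : Int) (out : List Int) : Prop := out = subscripts_for_offset_cmajor_alt D off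
instance (D : List Int) (off : Int) (out : List Int) : Decidable (Spec_subscripts_for_offset_cmajor D off out) := by unfold Spec_subscripts_for_offset_cmajor; infer_instance

-- ===== CLAIM (what is proved, stated in full; the proofs are below) =====
def Claim_equal_subscripts_for_offset_cmajor : Prop := ∀ (D : List Int) (off : Int), Dom_subscripts_for_offset_cmajor D off → Pre_subscripts_for_offset_cmajor D off → Spec_subscripts_for_offset_cmajor D off (subscripts_for_offset_cmajor D off)

-- ===== LEMMAS AND PROOFS =====

-- running quotient: off divided (floor) by D[0], …, D[k-1] in turn
def pvPref (D : List Int) (off : Int) : Nat → Int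
  | 0 => off
  | k+1 => PySem.Int.floordiv (pvPref D off k) (PySem.List.pyGetD D (k : Int) 0)

lemma pvPref_foldl (D : List Int) (off : Int) (k : Nat) :
    (PySem.List.pyRange 0 (k : Int) 1).foldl
      (fun s i => PySem.Int.floordiv s (PySem.List.pyGetD D i 0)) off = pvPref D off k := by
  induction k with
  | zero => simp [PySem.List.pyRange_one_eq_nil, pvPref]
  | succ k ih =>
    have h : ((k : Int) + 1) = ((k + 1 : Nat) : Int) := by push_cast; ring
    rw [pvPref, ← ih, ← h, PySem.List.pyRange_one_succ_right (by positivity)]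
    simp

lemma pv_take_set (X : List Int) (k : Nat) (v : Int) (h : k < X.length) :
    (X.set k v).take (k + 1) = X.take k ++ [v] := by
  apply List.ext_getElem
  · simp [List.length_take]; omega
  · intro i h1 h2
    simp only [List.length_take, List.length_set] at h1
    rcases Nat.lt_or_ge i k with hik | hik
    · simp [List.getElem_take, List.getElem_append, Nat.ne_of_gt hik, hik]
      exact fun h' => absurd h' (by omega)
    · have : i = k := by omega
      subst this
      simp [List.getElem_take]

lemma pv_setfold (g : Int → Int) (m : Nat) :
    ∀ (k : Nat) (X : List Int), X.length = m → k ≤ m →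
    (PySem.List.pyRange (k : Int) (m : Int) 1).foldl
        (fun X j => PySem.List.pySetD X j (g j)) X
      = X.take k ++ (List.range' k (m - k)).map (fun t : Nat => g (t : Int)) := by
  intro k
  induction hk : m - k generalizing k with
  | zero =>
    intro X hX hkm
    have : m = k := by omega
    subst this
    simp [PySem.List.pyRange_one_eq_nil, List.take_of_length_le, hX]
  | succ n ih =>
    intro X hX hkm
    have hkm' : k < m := by omega
    rw [PySem.List.pyRange_one_cons (by exact_mod_cast hkm')]
    have hstep : ((k : Int) + 1) = ((k + 1 : Nat) : Int) := by push_cast; ring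
    simp only [List.foldl_cons]
    rw [PySem.List.pySetD_natCast, hstep,
      ih (k + 1) (by omega) (X.set k (g (k : Int))) (by simp [hX]) (by omega)]
    have hklen : k < X.length := by omega
    rw [pv_take_set X k (g (k : Int)) hklen]
    rw [List.range'_succ]
    simp

lemma pv_pairfold (D : List Int) (off : Int) :
    ∀ (n a : Nat) (X : List Int),
    (PySem.List.pyRange (a : Int) ((a + n : Nat) : Int) 1).foldl
        (fun (Xq : List Int × Int) j =>
          (Xq.1 ++ [PySem.Int.mod Xq.2 (PySem.List.pyGetD D j 0)],
           PySem.Int.floordiv Xq.2 (PySem.List.pyGetD D j 0))) (X, pvPref D off a)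
      = (X ++ (List.range' a n).map
            (fun t : Nat => PySem.Int.mod (pvPref D off t) (PySem.List.pyGetD D (t : Int) 0)),
         pvPref D off (a + n)) := by
  intro n
  induction n with
  | zero => intro a X; simp [PySem.List.pyRange_one_eq_nil]
  | succ n ih =>
    intro a X
    have hc : (a : Int) < ((a + (n + 1) : Nat) : Int) := by push_cast; omega
    rw [PySem.List.pyRange_one_cons hc]
    simp only [List.foldl_cons]
    have hstep : ((a : Int) + 1) = ((a + 1 : Nat) : Int) := by push_cast; ring
    have hsum : ((a + (n + 1) : Nat) : Int) = (((a + 1) + n : Nat) : Int) := by push_cast; ring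
    rw [hstep, hsum]
    have hq : PySem.Int.floordiv (pvPref D off a) (PySem.List.pyGetD D (a : Int) 0)
        = pvPref D off (a + 1) := rfl
    rw [hq, ih (a + 1)]
    have hn : a + 1 + n = a + (n + 1) := by omega
    rw [hn, List.range'_succ]
    simp


-- A's per-index branch expression as a function of the loop index
def pvGI (D : List Int) (off : Int) (j : Int) : Int :=
  if j = 0 then PySem.Int.mod off (PySem.List.pyGetD D 0 0)
  else if j = (D.length : Int) - 1 then
    (PySem.List.pyRange 0 ((D.length : Int) - 1) 1).foldl
      (fun s i => PySem.Int.floordiv s (PySem.List.pyGetD D i 0)) off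
  else
    PySem.Int.mod ((PySem.List.pyRange 0 j 1).foldl
      (fun s i => PySem.Int.floordiv s (PySem.List.pyGetD D i 0)) off)
      (PySem.List.pyGetD D j 0)

lemma pv_A_char (D : List Int) (off : Int) :
    subscripts_for_offset_cmajor D off
      = (List.range' 0 D.length).map (fun t : Nat => pvGI D off (t : Int)) := by
  unfold subscripts_for_offset_cmajor
  have h := pv_setfold (pvGI D off) D.length 0 (List.replicate D.length (-1)) (by simp) (by omega)
  simpa [pvGI] using h

-- ===== VERDICT (by name: the statement is the Claim_ definition above) =====
theorem subscripts_for_offset_cmajor_spec : Claim_equal_subscripts_for_offset_cmajor := by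
  intro D off _ _
  unfold Spec_subscripts_for_offset_cmajor
  by_cases hD : D = []
  · subst hD; rfl
  have hm1 : 1 <= D.length := List.length_pos_iff.mpr hD
  rw [pv_A_char]
  simp only [subscripts_for_offset_cmajor_alt]
  rw [if_neg (by simpa using hD)]
  by_cases h1 : D.length = 1
  · rw [h1]
    norm_num
    simp [pvGI]
  · have hm2 : 2 <= D.length := by omega
    -- B side: running-quotient fold
    have hcast : ((D.length : Int) - 1) = ((1 + (D.length - 2) : Nat) : Int) := by push_cast; omega
    have hq : PySem.Int.floordiv off (PySem.List.pyGetD D 0 0) = pvPref D off 1 := by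
      simp [pvPref]
    rw [hcast, hq]
    have hB := pv_pairfold D off (D.length - 2) 1
      [PySem.Int.mod off (PySem.List.pyGetD D 0 0)]
    simp only [Nat.cast_one] at hB
    rw [hB]
    rw [if_pos (by omega)]
    have hr : List.range' 0 D.length = 0 :: (List.range' 1 (D.length - 2) ++ [D.length - 1]) := by
      have e : D.length = ((D.length - 2) + 1) + 1 := by omega
      have h12 : 1 + (D.length - 2) = D.length - 1 := by omega
      conv_lhs => rw [e]
      rw [List.range'_succ, List.range'_concat]
      simp [h12]
    have h0 : pvGI D off ((0 : Nat) : Int) = PySem.Int.mod off (PySem.List.pyGetD D 0 0) := by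
      simp [pvGI]
    have hmid : ∀ t ∈ List.range' 1 (D.length - 2),
        pvGI D off (t : Int) = PySem.Int.mod (pvPref D off t) (PySem.List.pyGetD D (t : Int) 0) := by
      intro t ht
      rw [List.mem_range'_1] at ht
      have ht1 : (1 : Int) ≤ (t : Int) := by exact_mod_cast ht.1
      have ht2 : (t : Int) < (D.length : Int) - 1 := by
        have := ht.2
        omega
      unfold pvGI
      rw [if_neg (by omega), if_neg (by omega), pvPref_foldl]
    have hlast : pvGI D off ((D.length - 1 : Nat) : Int) = pvPref D off (D.length - 1) := by
      unfold pvGI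
      rw [if_neg (by omega), if_pos (by omega),
        show ((D.length : Int) - 1) = ((D.length - 1 : Nat) : Int) from by omega, pvPref_foldl]
    rw [hr, List.map_cons, List.map_append, List.map_singleton, h0, hlast,
      List.map_congr_left hmid]
    simp [show 1 + (D.length - 2) = D.length - 1 from by omega]
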